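-- pv_equiv track=rewrite | github.com/DNGros/R-U-A-Robot | datatoy/explore_personas.py | get_seq_numbered_lines
-- ===== SOURCE A (Python) =====
-- from typing import Iterable, List, Tuple, Dict, FrozenSet, Set
--
-- def get_seq_numbered_lines(lines) -> Iterable[List[str]]:
--     """Load using the format that ParlAI uses with numbered lines which reset
--     at 1 every examples. This gets all the lines of a sequential set of lines."""
--     out = []
--     for line in lines:
--         if line.startswith("1 ") and out:
--             yield out
--             out = []
--         line_with_number_stripped_out = " ".join(line.split(" ")[1:])
--         out.append(line_with_number_stripped_out)
--     if out:
--         yield out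
-- ===== SOURCE B (Python) =====
-- def get_seq_numbered_lines(lines):
--     """Index-and-slice reorganization: find block boundaries first, then slice."""
--     L = list(lines)
--     stripped = [" ".join(l.split(" ")[1:]) for l in L]
--     bounds = [i for i in range(len(L)) if i > 0 and L[i].startswith("1 ")]
--     starts = [0] + bounds
--     ends = bounds + [len(L)]
--     for a, b in zip(starts, ends):
--         seg = stripped[a:b]
--         if seg:
--             yield seg
-- ===== Notes on version B (the rewrite author's own statement) =====
-- stated objective: alternative
-- what changed: Replaces the accumulate-and-yield single pass with a two-phase index/slice scheme: first compute the boundary indices of lines starting with '1 ', then slice the stripped list into consecutive segments between boundaries.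
import Mathlib
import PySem

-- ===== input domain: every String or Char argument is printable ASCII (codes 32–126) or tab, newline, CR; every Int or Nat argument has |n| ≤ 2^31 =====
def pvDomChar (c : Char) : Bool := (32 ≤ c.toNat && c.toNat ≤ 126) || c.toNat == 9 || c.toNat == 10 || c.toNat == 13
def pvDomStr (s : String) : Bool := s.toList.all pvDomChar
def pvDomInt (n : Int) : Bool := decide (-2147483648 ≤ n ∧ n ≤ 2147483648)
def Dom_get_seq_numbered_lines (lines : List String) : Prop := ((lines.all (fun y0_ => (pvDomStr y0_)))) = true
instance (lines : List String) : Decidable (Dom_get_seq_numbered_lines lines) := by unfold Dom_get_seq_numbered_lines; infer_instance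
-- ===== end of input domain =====

-- B reorganizes A's accumulate-and-yield pass into a boundary-index pass plus a slicing pass (objective: alternative, same cost).
-- Both Pythons are generators; the equivalence is about the fully materialized sequence of yielded lists.

-- ===== PORT A =====
-- " ".join(line.split(" ")[1:])  (shared sub-expression of both Pythons; split? is some since the separator " " is nonempty)
def pvStrip (line : String) : String :=
  PySem.Str.join " " (((PySem.Str.split? line " ").getD []).drop 1)

-- one iteration of A's for-loop over the state (yielded-so-far, out); 'and out' is list truthiness
def pvStepA (s : List (List String) × List String) (line : String) :
    List (List String) × List String :=
  if PySem.Str.startswith line "1 " = true ∧ s.2 ≠ [] then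
    (s.1 ++ [s.2], [pvStrip line])
  else
    (s.1, s.2 ++ [pvStrip line])

def get_seq_numbered_lines (lines : List String) : List (List String) :=
  let s := lines.foldl pvStepA ([], [])
  if s.2 = [] then s.1 else s.1 ++ [s.2]

-- ===== PORT B =====
-- [i for i in range(len(L)) if i > 0 and L[i].startswith("1 ")]
def pvBounds (L : List String) : List Nat :=
  (List.range L.length).filter (fun i => decide (0 < i) && PySem.Str.startswith (L.getD i "") "1 ")

-- stripped[a:b]; exact here since both indices are nonnegative and at most len(stripped)
def pvSeg (st : List String) (p : Nat × Nat) : List String :=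
  (st.drop p.1).take (p.2 - p.1)

def get_seq_numbered_lines_alt (lines : List String) : List (List String) :=
  let stripped := lines.map pvStrip
  let bounds := pvBounds lines
  let starts := 0 :: bounds
  let ends := bounds ++ [lines.length]
  (starts.zip ends).filterMap (fun p =>
    let seg := pvSeg stripped p
    if seg = [] then none else some seg)

-- ===== PRECONDITION & SPEC =====
def Spec_get_seq_numbered_lines (lines : List String) (out : List (List String)) : Prop := out = get_seq_numbered_lines_alt lines
instance (lines : List String) (out : List (List String)) : Decidable (Spec_get_seq_numbered_lines lines out) := by unfold Spec_get_seq_numbered_lines; infer_instance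

-- ===== CLAIM (what is proved, stated in full; the proofs are below) =====
def Claim_equal_get_seq_numbered_lines : Prop := ∀ (lines : List String), Dom_get_seq_numbered_lines lines → Spec_get_seq_numbered_lines lines (get_seq_numbered_lines lines)

-- ===== LEMMAS AND PROOFS =====

-- every boundary index is a positive in-range index
lemma mem_pvBounds {L : List String} {i : Nat} (h : i ∈ pvBounds L) : 0 < i ∧ i < L.length := by
  unfold pvBounds at h
  rcases List.mem_filter.mp h with ⟨hr, hp⟩
  exact ⟨of_decide_eq_true (Bool.and_elim_left hp), List.mem_range.mp hr⟩

-- boundary indices of a snoc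
lemma pvBounds_snoc (M : List String) (x : String) :
    pvBounds (M ++ [x]) =
      pvBounds M ++
        (if (decide (0 < M.length) && PySem.Str.startswith x "1 ") = true then [M.length] else []) := by
  unfold pvBounds
  rw [List.length_append, List.length_singleton, List.range_succ, List.filter_append]
  congr 1
  · apply List.filter_congr
    intro i hi
    have hi' : i < M.length := List.mem_range.mp hi
    have : (M ++ [x]).getD i "" = M.getD i "" := by
      simp only [List.getD, List.getElem?_append_left hi']
    rw [this]
  · have hx : (M ++ [x]).getD M.length "" = x := by
      simp only [List.getD, List.getElem?_concat_length, Option.getD_some]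
    rw [List.filter_singleton, hx, Bool.cond_eq_ite]

-- zip against a snoc on the right when the left list is one element longer
lemma zip_snoc_right : ∀ (bs : List Nat) (a n : Nat),
    (a :: bs).zip (bs ++ [n]) = (a :: bs).zip bs ++ [(bs.getLastD a, n)] := by
  intro bs
  induction bs with
  | nil => intro a n; simp
  | cons b bs ih =>
      intro a n
      simp only [List.cons_append, List.zip_cons_cons, ih b n]
      rw [List.getLastD_cons]

-- an extra element on the longer left list does not change the zip
lemma zip_snoc_left : ∀ (l' : List Nat) (l : List Nat) (x : Nat), l'.length ≤ l.length →
    (l ++ [x]).zip l' = l.zip l' := by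
  intro l'
  induction l' with
  | nil => intro l x _; simp
  | cons b bs ih =>
      intro l x h
      cases l with
      | nil => simp at h
      | cons a l =>
          simp only [List.cons_append, List.zip_cons_cons]
          rw [ih l x (by simpa using h)]

-- a slice entirely inside the prefix ignores an appended suffix
lemma pvSeg_append (st ex : List String) (a b : Nat) (ha : a ≤ st.length) (hb : b ≤ st.length) :
    pvSeg (st ++ ex) (a, b) = pvSeg st (a, b) := by
  unfold pvSeg
  simp only
  rw [List.take_drop, List.take_drop, List.take_append_of_le_length (by omega)]

-- the slice from the last boundary to the end is exactly the tail drop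
lemma pvSeg_last (st : List String) (l : Nat) (_hl : l ≤ st.length) :
    pvSeg st (l, st.length) = st.drop l := by
  unfold pvSeg
  simp only
  apply List.take_of_length_le
  simp

-- segments over the closed pairs only look below the old length
lemma filterMap_seg_append (st ex : List String) (bs : List Nat)
    (hbs : ∀ i ∈ bs, i ≤ st.length) :
    ((0 :: bs).zip bs).filterMap (fun p =>
        let seg := pvSeg (st ++ ex) p; if seg = [] then none else some seg) =
    ((0 :: bs).zip bs).filterMap (fun p =>
        let seg := pvSeg st p; if seg = [] then none else some seg) := by
  apply List.filterMap_congr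
  intro p hp
  obtain ⟨h1, h2⟩ := List.of_mem_zip hp
  have ha : p.1 ≤ st.length := by
    rcases List.mem_cons.mp h1 with h | h
    · omega
    · exact hbs _ h
  have hb : p.2 ≤ st.length := hbs _ h2
  rw [show p = (p.1, p.2) from rfl, pvSeg_append st ex p.1 p.2 ha hb]

-- the invariant of A's fold on a nonempty list: the yielded blocks are the closed
-- segments, the accumulator is the tail from the last boundary, and that tail is nonempty
lemma foldA_inv : ∀ (M : List String), M ≠ [] →
    (M.foldl pvStepA ([], [])).1 =
      (((0 : Nat) :: pvBounds M).zip (pvBounds M)).filterMap (fun p =>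
        let seg := pvSeg (M.map pvStrip) p; if seg = [] then none else some seg)
    ∧ (M.foldl pvStepA ([], [])).2 = (M.map pvStrip).drop ((pvBounds M).getLastD 0)
    ∧ (pvBounds M).getLastD 0 < M.length := by
  intro M
  induction M using List.reverseRecOn with
  | nil => intro h; exact absurd rfl h
  | append_singleton M x ih =>
      intro _
      by_cases hM : M = []
      · subst hM
        refine ⟨?_, ?_, ?_⟩
        · simp [pvStepA, pvBounds, List.range_succ]
        · simp [pvStepA, pvBounds, List.range_succ]
        · simp [pvBounds, List.range_succ]
      · obtain ⟨h1, h2, h3⟩ := ih hM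
        have hstlen : (M.map pvStrip).length = M.length := by simp
        have hbnd : ∀ i ∈ pvBounds M, i ≤ (M.map pvStrip).length := fun i hi => by
          have := (mem_pvBounds hi).2; omega
        have hl : (pvBounds M).getLastD 0 ≤ (M.map pvStrip).length := by omega
        have hout : (M.foldl pvStepA ([], [])).2 ≠ [] := by
          rw [h2]
          intro hnil
          have := congrArg List.length hnil
          simp only [List.length_drop, List.length_nil, hstlen] at this
          omega
        have hfold : (M ++ [x]).foldl pvStepA ([], []) =
            pvStepA (M.foldl pvStepA ([], [])) x := List.foldl_append ..
        have hmapsnoc : (M ++ [x]).map pvStrip = M.map pvStrip ++ [pvStrip x] := by simp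
        by_cases hc : PySem.Str.startswith x "1 " = true
        · -- a new block starts at index M.length
          have hbs' : pvBounds (M ++ [x]) = pvBounds M ++ [M.length] := by
            rw [pvBounds_snoc, if_pos]
            rw [hc, Bool.and_true]
            exact decide_eq_true (List.length_pos_iff.mpr hM)
          have hstep : pvStepA (M.foldl pvStepA ([], [])) x =
              ((M.foldl pvStepA ([], [])).1 ++ [(M.foldl pvStepA ([], [])).2], [pvStrip x]) := by
            unfold pvStepA
            rw [if_pos ⟨hc, hout⟩]
          refine ⟨?_, ?_, ?_⟩
          · rw [hfold, hstep, hbs', hmapsnoc]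
            have hz : ((0 :: (pvBounds M ++ [M.length])).zip (pvBounds M ++ [M.length])) =
                ((0 : Nat) :: pvBounds M).zip (pvBounds M ++ [M.length]) := by
              rw [show (0 : Nat) :: (pvBounds M ++ [M.length]) =
                    ((0 : Nat) :: pvBounds M) ++ [M.length] from rfl]
              exact zip_snoc_left _ _ _ (by simp)
            rw [hz, zip_snoc_right, List.filterMap_append,
                filterMap_seg_append _ [pvStrip x] _ hbnd, ← h1]
            rw [List.filterMap]
            simp only
            rw [pvSeg_append _ [pvStrip x] _ _ hl (by omega),
                show M.length = (M.map pvStrip).length from hstlen.symm,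
                pvSeg_last _ _ hl, ← h2]
            simp [hout]
          · rw [hfold, hstep, hbs', hmapsnoc, List.getLastD_concat, ← hstlen,
                List.drop_left]
          · rw [hbs', List.getLastD_concat]
            simp
        · -- the line joins the current block
          have hc' : PySem.Str.startswith x "1 " = false := by
            simpa using hc
          have hbs' : pvBounds (M ++ [x]) = pvBounds M := by
            rw [pvBounds_snoc, hc', Bool.and_false]
            simp
          have hstep : pvStepA (M.foldl pvStepA ([], [])) x =
              ((M.foldl pvStepA ([], [])).1, (M.foldl pvStepA ([], [])).2 ++ [pvStrip x]) := by
            unfold pvStepA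
            rw [if_neg]
            intro hand
            exact hc hand.1
          refine ⟨?_, ?_, ?_⟩
          · rw [hfold, hstep, hbs', hmapsnoc, filterMap_seg_append _ [pvStrip x] _ hbnd]
            exact h1
          · rw [hfold, hstep, hbs', hmapsnoc, h2, List.drop_append_of_le_length hl]
          · rw [hbs']
            simp only [List.length_append, List.length_cons, List.length_nil]
            omega

-- ===== VERDICT (by name: the statement is the Claim_ definition above) =====
theorem get_seq_numbered_lines_spec : Claim_equal_get_seq_numbered_lines := by
  intro lines _
  unfold Spec_get_seq_numbered_lines
  by_cases h : lines = []
  · subst h; rfl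
  · obtain ⟨h1, h2, h3⟩ := foldA_inv lines h
    unfold get_seq_numbered_lines get_seq_numbered_lines_alt
    have hstlen : (lines.map pvStrip).length = lines.length := by simp
    have hl : (pvBounds lines).getLastD 0 ≤ (lines.map pvStrip).length := by omega
    have hout : (lines.foldl pvStepA ([], [])).2 ≠ [] := by
      rw [h2]
      intro hnil
      have := congrArg List.length hnil
      simp only [List.length_drop, List.length_nil, hstlen] at this
      omega
    simp only [if_neg hout]
    rw [zip_snoc_right, List.filterMap_append, ← h1]
    congr 1
    rw [List.filterMap]
    rw [show lines.length = (lines.map pvStrip).length from hstlen.symm,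
        pvSeg_last _ _ hl, ← h2]
    simp only [if_neg hout, List.filterMap_nil]
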